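-- pv_equiv track=rewrite | github.com/anuarimanbayev/code-test-problems | python/even-occuring-element.py | even_occuring_element
-- ===== SOURCE A (Python) =====
-- def even_occuring_element(arr):
--     """Returns the even occuring element within a list of integers"""
--     """Test like so: even_occuring_element([2,3,4,5,6,2,11])"""
--
--     dict = {}
--     for num in arr:
--         if num in dict:
--             dict[num] += 1
--         else:
--             dict[num] = 1
--
--     for num in dict:
--         if not dict[num] & 1: # bitwise check for parity.
--             return num
-- ===== SOURCE B (Python) =====
-- def even_occuring_element(arr):
--     """Returns the even occuring element within a list of integers"""
--     odd = set()
--     for num in arr: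
--         if num in odd:
--             odd.discard(num)
--         else:
--             odd.add(num)
--     for num in arr:
--         if num not in odd:
--             return num
-- ===== Notes on version B (the rewrite author's own statement) =====
-- stated objective: alternative
-- what changed: Replaces the integer-count dictionary and the key-iteration pass with a parity set (toggle membership per occurrence) and a second pass over the input list returning the first element absent from the odd-parity set.
import Mathlib
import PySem

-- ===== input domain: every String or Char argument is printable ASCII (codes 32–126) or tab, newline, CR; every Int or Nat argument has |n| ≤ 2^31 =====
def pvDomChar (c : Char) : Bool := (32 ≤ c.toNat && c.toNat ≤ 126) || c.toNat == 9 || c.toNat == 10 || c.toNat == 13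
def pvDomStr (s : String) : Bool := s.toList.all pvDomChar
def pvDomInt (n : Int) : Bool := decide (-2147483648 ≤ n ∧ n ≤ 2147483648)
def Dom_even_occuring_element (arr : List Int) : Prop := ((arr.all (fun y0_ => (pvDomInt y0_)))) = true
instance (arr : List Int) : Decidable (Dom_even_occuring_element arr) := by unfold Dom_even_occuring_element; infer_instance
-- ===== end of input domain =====

-- B replaces the count dictionary + key-iteration pass with a parity set toggled per occurrence and a second pass over the list; same O(n) cost.

-- ===== PORT A =====
-- A's counting loop: 'if num in dict: dict[num] += 1 else: dict[num] = 1'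
def pvCountA (arr : List Int) : PySem.Dict Int Int :=
  arr.foldl (fun d num =>
    if d.contains num then d.insert num (d.getD num 0 + 1)
    else d.insert num 1) PySem.Dict.empty

-- 'for num in dict: if not dict[num] & 1: return num' (dict iteration = key insertion order)
def even_occuring_element (arr : List Int) : Option Int :=
  (pvCountA arr).keys.find? (fun num => PySem.Int.band ((pvCountA arr).getD num 0) 1 == 0)

-- ===== PORT B =====
-- B's parity loop: 'if num in odd: odd.discard(num) else: odd.add(num)'
def pvOddB (arr : List Int) : PySem.Set Int :=
  arr.foldl (fun s num =>
    if PySem.Set.contains s num then PySem.Set.discard s num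
    else PySem.Set.add s num) PySem.Set.empty

-- 'for num in arr: if num not in odd: return num'
def even_occuring_element_alt (arr : List Int) : Option Int :=
  arr.find? (fun num => !(PySem.Set.contains (pvOddB arr) num))

-- ===== PRECONDITION & SPEC =====
def Spec_even_occuring_element (arr : List Int) (out : Option Int) : Prop := out = even_occuring_element_alt arr
instance (arr : List Int) (out : Option Int) : Decidable (Spec_even_occuring_element arr out) := by unfold Spec_even_occuring_element; infer_instance

-- ===== CLAIM (what is proved, stated in full; the proofs are below) =====
def Claim_equal_even_occuring_element : Prop := ∀ (arr : List Int), Dom_even_occuring_element arr → Spec_even_occuring_element arr (even_occuring_element arr)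

-- ===== LEMMAS AND PROOFS =====

-- A's counting loop is collections.Counter
theorem pvCountA_eq_counter (arr : List Int) : pvCountA arr = PySem.Dict.counter arr := by
  unfold pvCountA
  rw [← PySem.Dict.foldl_insert_getD_add_one_eq_counter]
  apply PySem.List.foldl_congr_mem
  intro d num _
  by_cases h : d.contains num = true
  · rw [if_pos h]
  · rw [if_neg h, PySem.Dict.getD_of_not_contains d 0 (by simpa using h)]
    norm_num

-- membership in the parity fold ↔ parity flipped by the count
theorem pvParity_mem (l : List Int) (s : List Int) (v : Int) :
    (v ∈ l.foldl (fun s num =>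
      if PySem.Set.contains s num then PySem.Set.discard s num
      else PySem.Set.add s num) s) ↔ ((v ∈ s) ↔ ¬ Odd (l.count v)) := by
  induction l generalizing s with
  | nil => simp [Nat.odd_iff]
  | cons x l ih =>
    rw [List.foldl_cons, ih]
    by_cases hvx : v = x
    · subst hvx
      have hmem : (v ∈ (if PySem.Set.contains s v then PySem.Set.discard s v
          else PySem.Set.add s v)) ↔ ¬ (v ∈ s) := by
        by_cases h : v ∈ s
        · rw [if_pos ((PySem.Set.contains_iff s v).mpr h), PySem.Set.mem_discard]
          tauto
        · rw [if_neg (by rw [PySem.Set.contains_iff]; exact h), PySem.Set.mem_add]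
          tauto
      rw [hmem, List.count_cons_self, Nat.odd_add_one, not_not]
      tauto
    · have hmem : (v ∈ (if PySem.Set.contains s x then PySem.Set.discard s x
          else PySem.Set.add s x)) ↔ v ∈ s := by
        by_cases h : PySem.Set.contains s x = true
        · rw [if_pos h, PySem.Set.mem_discard]
          tauto
        · rw [if_neg h, PySem.Set.mem_add]
          tauto
      rw [hmem, List.count_cons_of_ne (fun hxv => hvx hxv.symm)]

theorem pvOddB_mem (arr : List Int) (v : Int) : v ∈ pvOddB arr ↔ Odd (arr.count v) := by
  unfold pvOddB
  rw [pvParity_mem]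
  simp

-- find? over the ordered-dedup of l equals find? over l (for any predicate)
theorem pvFind_foldl_add (p : Int → Bool) (l : List Int) (s : List Int) :
    (l.foldl PySem.Set.add s).find? p = (s.find? p).or (l.find? p) := by
  induction l generalizing s with
  | nil => simp
  | cons x l ih =>
    rw [List.foldl_cons, ih]
    by_cases hc : x ∈ s
    · rw [PySem.Set.add_of_mem hc]
      by_cases hp : p x = true
      · have : s.find? p ≠ none := by
          rw [Ne, List.find?_eq_none]
          intro hall
          exact hall x hc hp
        obtain ⟨a, ha⟩ := Option.ne_none_iff_exists'.mp this
        rw [ha]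
        rfl
      · rw [List.find?_cons_of_neg hp]
    · rw [PySem.Set.add_of_not_mem hc, List.find?_append, Option.or_assoc]
      congr 1
      cases hp : p x <;> simp [hp]

theorem pvFind_ofList (p : Int → Bool) (l : List Int) :
    (PySem.Set.ofList l).find? p = l.find? p := by
  rw [PySem.Set.ofList_eq_foldl, pvFind_foldl_add]
  rfl

-- the two final-pass predicates agree pointwise
theorem pvPred_eq (arr : List Int) (v : Int) :
    (PySem.Int.band ((PySem.Dict.counter arr).getD v 0) 1 == 0)
      = (!(PySem.Set.contains (pvOddB arr) v)) := by
  rw [PySem.Dict.getD_counter, PySem.Int.band_one]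
  have h2 : PySem.Int.mod ((arr.count v : Nat) : Int) 2 = (((arr.count v) % 2 : Nat) : Int) := by
    exact_mod_cast PySem.Int.mod_natCast (arr.count v) 2
  rw [h2]
  by_cases hodd : Odd (arr.count v)
  · have hm : arr.count v % 2 = 1 := Nat.odd_iff.mp hodd
    have hc : PySem.Set.contains (pvOddB arr) v = true :=
      (PySem.Set.contains_iff _ _).mpr ((pvOddB_mem arr v).mpr hodd)
    rw [hm, hc]
    decide
  · have hm : arr.count v % 2 = 0 := Nat.even_iff.mp (Nat.not_odd_iff_even.mp hodd)
    have hc : PySem.Set.contains (pvOddB arr) v = false := by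
      rw [Bool.eq_false_iff, Ne, PySem.Set.contains_iff]
      exact fun h => hodd ((pvOddB_mem arr v).mp h)
    rw [hm, hc]
    decide

-- ===== VERDICT (by name: the statement is the Claim_ definition above) =====
theorem even_occuring_element_spec : Claim_equal_even_occuring_element := by
  intro arr _
  unfold Spec_even_occuring_element even_occuring_element even_occuring_element_alt
  rw [pvCountA_eq_counter, PySem.Dict.keys_counter]
  have hp : (fun num => PySem.Int.band ((PySem.Dict.counter arr).getD num 0) 1 == 0)
      = (fun num => !(PySem.Set.contains (pvOddB arr) num)) := by
    funext v
    exact pvPred_eq arr v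
  rw [hp, pvFind_ofList]
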